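-- pv_equiv track=rewrite | github.com/ErickMoreiraVinueza/more-projects | StrSymmetryPoint.py | StrSymmetryPoint
-- ===== SOURCE A (Python) =====
-- def StrSymmetryPoint(cadena_caracteres):
--     """"
--     Se crea la función para la resolución de encontrar una simetría en la cadena si existiese.
--
--     Parámetros:
--     -------------------
--     Recibe la variable
--     str = cadena_caracteres que ha digitado el usuario
--
--     Retorna:
--     -------------------
--     Retorna la variable
--     int = numero_no_repetido que corresponde al término que estamos buscando.
--     """
--     #Calculo el tamaño de mi cadena ingresada
--     tamanio_cadena = len(cadena_caracteres)
--     #Solo puede haber simestría si la cadena es impar, por lo tanto si el módulo es 0 quiere decir que la cadena es par, por lo tanto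
--     #retorno el -1.
--     if(tamanio_cadena % 2 == 0):
--         return -1
--     #En este caso si solo tengo un caracter retorno 0 como dice el problema dado que no tendría demás caracteres en la cadena.
--     if(tamanio_cadena == 1):
--         return 0
--     #Separo la cadena a la mitad
--     mitad_cadena = int(tamanio_cadena/2)
--     inicio = 0
--     final = tamanio_cadena - 1
--     for i in range(inicio,final):
--         if(cadena_caracteres[inicio] != cadena_caracteres[final]):
--             return -1
--         inicio = inicio + 1
--         final = final - 1
--     return mitad_cadena
-- ===== SOURCE B (Python) =====
-- def StrSymmetryPoint(cadena_caracteres):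
--     n = len(cadena_caracteres)
--     if n % 2 == 0:
--         return -1
--     return n // 2 if cadena_caracteres == cadena_caracteres[::-1] else -1
-- ===== Notes on version B (the rewrite author's own statement) =====
-- stated objective: idiomatic
-- what changed: Replaces the explicit two-pointer index scan with a whole-string reversed-copy comparison (s == s[::-1]) guarded by the even-length check.
import Mathlib
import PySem

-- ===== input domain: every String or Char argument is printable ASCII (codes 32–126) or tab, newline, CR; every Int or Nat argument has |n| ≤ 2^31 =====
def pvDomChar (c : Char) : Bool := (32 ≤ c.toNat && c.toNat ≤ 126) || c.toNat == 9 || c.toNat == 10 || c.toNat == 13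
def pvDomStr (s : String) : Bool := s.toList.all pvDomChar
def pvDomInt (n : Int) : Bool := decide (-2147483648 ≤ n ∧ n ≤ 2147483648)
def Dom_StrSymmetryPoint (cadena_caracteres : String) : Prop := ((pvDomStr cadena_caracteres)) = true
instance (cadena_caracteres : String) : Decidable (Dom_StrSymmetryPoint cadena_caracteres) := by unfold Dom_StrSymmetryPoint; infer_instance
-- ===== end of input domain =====

-- B replaces A's explicit two-pointer index scan with a reversed-copy comparison (s == s[::-1]); objective: more idiomatic, same cost.

-- ===== PORT A =====
-- the for-loop over range(inicio, final) carrying the mutable inicio/final pair; fuel = iteration count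
def pvALoop (cs : List Char) (inicio final : Int) : Nat → Option Int
  | 0 => none
  | Nat.succ k =>
    if PySem.List.pyGet? cs inicio ≠ PySem.List.pyGet? cs final then some (-1)
    else pvALoop cs (inicio + 1) (final - 1) k

def StrSymmetryPoint (cadena_caracteres : String) : Int :=
  let cs := cadena_caracteres.toList
  let tamanio_cadena : Int := cs.length
  if PySem.Int.mod tamanio_cadena 2 = 0 then -1
  else if tamanio_cadena = 1 then 0
  else
    let mitad_cadena := PySem.Int.truncdiv tamanio_cadena 2  -- int(tamanio_cadena/2)
    match pvALoop cs 0 (tamanio_cadena - 1) (tamanio_cadena - 1).toNat with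
    | some r => r
    | none => mitad_cadena

-- ===== PORT B =====
def StrSymmetryPoint_alt (cadena_caracteres : String) : Int :=
  let cs := cadena_caracteres.toList
  let n : Int := cs.length
  if PySem.Int.mod n 2 = 0 then -1
  else if cs = cs.reverse then PySem.Int.floordiv n 2 else -1

-- ===== PRECONDITION & SPEC =====
def Spec_StrSymmetryPoint (cadena_caracteres : String) (out : Int) : Prop := out = StrSymmetryPoint_alt cadena_caracteres
instance (cadena_caracteres : String) (out : Int) : Decidable (Spec_StrSymmetryPoint cadena_caracteres out) := by unfold Spec_StrSymmetryPoint; infer_instance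

-- ===== CLAIM (what is proved, stated in full; the proofs are below) =====
def Claim_equal_StrSymmetryPoint : Prop := ∀ (cadena_caracteres : String), Dom_StrSymmetryPoint cadena_caracteres → Spec_StrSymmetryPoint cadena_caracteres (StrSymmetryPoint cadena_caracteres)

-- ===== LEMMAS AND PROOFS =====

-- A's loop succeeds (runs to completion) iff every visited index pair agrees
theorem pvALoop_none_iff (cs : List Char) (k : Nat) :
    ∀ (a b : Int), pvALoop cs a b k = none ↔
      ∀ j : Nat, j < k → PySem.List.pyGet? cs (a + j) = PySem.List.pyGet? cs (b - j) := by
  induction k with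
  | zero => intro a b; simp [pvALoop]
  | succ k ih =>
    intro a b
    by_cases h : PySem.List.pyGet? cs a = PySem.List.pyGet? cs b
    · rw [pvALoop, if_neg (by simpa using h), ih]
      constructor
      · intro hall j hj
        match j with
        | 0 => simpa using h
        | j + 1 =>
          have := hall j (by omega)
          have e1 : a + 1 + (j : Int) = a + ((j : Nat) + 1 : Nat) := by push_cast; ring
          have e2 : b - 1 - (j : Int) = b - ((j : Nat) + 1 : Nat) := by push_cast; ring
          rw [e1, e2] at this
          exact this
      · intro hall j hj
        have := hall (j + 1) (by omega)
        have e1 : a + 1 + (j : Int) = a + ((j : Nat) + 1 : Nat) := by push_cast; ring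
        have e2 : b - 1 - (j : Int) = b - ((j : Nat) + 1 : Nat) := by push_cast; ring
        rw [e1, e2]
        exact this
    · rw [pvALoop, if_pos (by simpa using h)]
      constructor
      · intro hc; exact absurd hc (by simp)
      · intro hall
        exact absurd (by simpa using hall 0 (by omega)) h

-- A's loop only ever produces -1 when it exits early
theorem pvALoop_some (cs : List Char) (k : Nat) :
    ∀ (a b : Int) (r : Int), pvALoop cs a b k = some r → r = -1 := by
  induction k with
  | zero => intro a b r h; simp [pvALoop] at h
  | succ k ih =>
    intro a b r h
    rw [pvALoop] at h
    split at h
    · simpa using h.symm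
    · exact ih _ _ _ h

-- palindrome characterization: all index pairs (j, n-1-j) for j < n-1 agree iff the list equals its reverse
theorem pal_get (cs : List Char) (j : Nat) (hj : j < cs.length - 1)
    (h : PySem.List.pyGet? cs (0 + (j : Int)) = PySem.List.pyGet? cs ((cs.length : Int) - 1 - j)) :
    cs[j]'(by omega) = cs[cs.length - 1 - j]'(by omega) := by
  have e1 : (0 : Int) + (j : Nat) = ((j : Nat) : Int) := by omega
  have e2 : ((cs.length : Int)) - 1 - (j : Nat) = ((cs.length - 1 - j : Nat) : Int) := by omega
  rw [e1, e2, PySem.List.pyGet?_natCast, PySem.List.pyGet?_natCast,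
     List.getElem?_eq_getElem (by omega), List.getElem?_eq_getElem (by omega)] at h
  exact Option.some.inj h

theorem palindrome_iff (cs : List Char) (hne : cs ≠ []) :
    (∀ j : Nat, j < cs.length - 1 →
        PySem.List.pyGet? cs (0 + j) = PySem.List.pyGet? cs ((cs.length : Int) - 1 - j)) ↔
      cs = cs.reverse := by
  have hlen : 0 < cs.length := List.length_pos_iff.mpr hne
  constructor
  · intro hall
    apply List.ext_getElem (by simp)
    intro i hi hi2
    rw [List.getElem_reverse]
    by_cases hil : i < cs.length - 1
    · exact pal_get cs i hil (hall i hil)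
    · -- i = cs.length - 1
      by_cases h1 : cs.length = 1
      · have : i = 0 := by omega
        subst this
        simp [h1]
      · have h0 := pal_get cs 0 (by omega) (hall 0 (by omega))
        have gi : i = cs.length - 1 := by omega
        have gj : cs.length - 1 - i = 0 := by omega
        subst gi
        convert h0.symm using 2
  · intro hpal j hj
    have e1 : (0 : Int) + (j : Nat) = ((j : Nat) : Int) := by omega
    have e2 : ((cs.length : Int)) - 1 - (j : Nat) = ((cs.length - 1 - j : Nat) : Int) := by omega
    rw [e1, e2, PySem.List.pyGet?_natCast, PySem.List.pyGet?_natCast]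
    conv_lhs => rw [hpal]
    rw [List.getElem?_reverse (by omega)]

-- ===== VERDICT (by name: the statement is the Claim_ definition above) =====
theorem StrSymmetryPoint_spec : Claim_equal_StrSymmetryPoint := by
  intro s _
  unfold Spec_StrSymmetryPoint StrSymmetryPoint StrSymmetryPoint_alt
  set cs := s.toList with hcs
  simp only []
  by_cases heven : PySem.Int.mod (cs.length : Int) 2 = 0
  · rw [if_pos heven, if_pos heven]
  · rw [if_neg heven, if_neg heven]
    have hlenpos : cs.length ≠ 0 := by
      intro h0
      apply heven
      rw [h0]; decide
    by_cases h1 : (cs.length : Int) = 1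
    · rw [if_pos h1]
      have hl1 : cs.length = 1 := by exact_mod_cast h1
      match cs, hl1 with
      | [c], _ => simp [PySem.Int.floordiv]
    · rw [if_neg h1]
      have hfd : PySem.Int.truncdiv (cs.length : Int) 2 = PySem.Int.floordiv (cs.length : Int) 2 := by
        unfold PySem.Int.truncdiv PySem.Int.floordiv
        rw [Int.tdiv_eq_ediv_of_nonneg (by positivity), Int.fdiv_eq_ediv]
        simp
      have hk : ((cs.length : Int) - 1).toNat = cs.length - 1 := by omega
      by_cases hpal : cs = cs.reverse
      · rw [if_pos hpal]
        have : pvALoop cs 0 ((cs.length : Int) - 1) ((cs.length : Int) - 1).toNat = none := by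
          rw [pvALoop_none_iff, hk]
          exact (palindrome_iff cs (by simpa using hlenpos)).mpr hpal
        rw [this, hfd]
      · rw [if_neg hpal]
        rcases hres : pvALoop cs 0 ((cs.length : Int) - 1) ((cs.length : Int) - 1).toNat with _ | r
        · exfalso
          apply hpal
          rw [pvALoop_none_iff, hk] at hres
          exact (palindrome_iff cs (by simpa using hlenpos)).mp hres
        · rw [pvALoop_some cs _ _ _ _ hres]
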